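-- pv_equiv track=rewrite | github.com/Harito97/PythonAndScratch3Tutorial | ThiTinHocTre/Archived/2024_04_26/UocCuaDay.py | find_longest_subarray
-- ===== SOURCE A (Python) =====
-- def gcd(a, b):
--     while b:
--         a, b = b, a % b
--     return a
--
-- def find_longest_subarray(arr):
--     n = len(arr)
--     max_len = 0
--     l = 0
--
--     for i in range(n - 1):
--         d = arr[i]
--         for j in range(i + 1, n):
--             d = gcd(d, arr[j])
--             if d == 1:
--                 break
--             l += 1
--             max_len = max(max_len, l)
--         l = 0
--
--     return max_len + 1
-- ===== SOURCE B (Python) =====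
-- def find_longest_subarray(arr):
--     # One left-to-right pass keeping, per right endpoint, the distinct running
--     # gcd values of subarrays ending there with their leftmost start index.
--     def g2(a, b):
--         while b:
--             a, b = b, a % b
--         return a
--
--     max_len = 0
--     groups = []  # (gcd value, leftmost start), starts strictly increasing
--     for j, x in enumerate(arr):
--         new = []
--         seen = set()
--         for v, i in groups:
--             w = g2(v, x)
--             if w != 1 and w not in seen:
--                 seen.add(w)
--                 new.append((w, i))
--         groups = new
--         if groups:
--             max_len = max(max_len, j - groups[0][1])
--         groups.append((x, j))
--     return max_len + 1
-- ===== Notes on version B (the rewrite author's own statement) =====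
-- stated objective: faster
-- what changed: Replaces A's quadratic scan over every start index by a single left-to-right pass that maintains, per right endpoint, the O(log max|a|) distinct running gcd values of subarrays ending there together with their leftmost start index.
import Mathlib
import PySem

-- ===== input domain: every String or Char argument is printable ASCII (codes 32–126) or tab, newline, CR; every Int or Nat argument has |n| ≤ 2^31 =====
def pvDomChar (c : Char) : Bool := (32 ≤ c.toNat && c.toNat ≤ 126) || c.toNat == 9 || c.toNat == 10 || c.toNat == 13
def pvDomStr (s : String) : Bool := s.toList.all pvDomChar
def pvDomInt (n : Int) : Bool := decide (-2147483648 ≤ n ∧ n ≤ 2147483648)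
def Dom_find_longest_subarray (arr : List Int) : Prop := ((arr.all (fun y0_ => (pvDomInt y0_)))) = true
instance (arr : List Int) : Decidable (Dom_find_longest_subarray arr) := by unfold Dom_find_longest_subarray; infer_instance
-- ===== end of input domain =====

-- B replaces A's quadratic try-every-start scan by one left-to-right pass that keeps,
-- per right endpoint, the distinct running gcd values with their leftmost start (faster).

-- Python's helper gcd (while b: a, b = b, a % b), shared verbatim by A and B.
def pygcd (a b : Int) : Int :=
  if h : b = 0 then a else pygcd b (PySem.Int.mod a b)
termination_by b.natAbs
decreasing_by
  rcases lt_or_gt_of_ne h with hb | hb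
  · have h1 := PySem.Int.mod_neg_bounds (a := a) hb
    omega
  · have h1 := PySem.Int.mod_nonneg (a := a) hb
    have h2 := PySem.Int.mod_lt (a := a) hb
    omega

-- ===== PORT A =====
-- inner 'for j' loop of A: d the running gcd, rest = arr[j:], l and max_len as in A
def innerA (d : Int) (rest : List Int) (l m : Int) : Int :=
  match rest with
  | [] => m
  | x :: xs =>
    let d' := pygcd d x
    if d' = 1 then m else innerA d' xs (l + 1) (max m (l + 1))

-- outer 'for i' loop of A over the tails of arr
def outerA (t : List Int) (m : Int) : Int :=
  match t with
  | [] => m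
  | a :: rest => outerA rest (innerA a rest 0 m)

def find_longest_subarray (arr : List Int) : Int := outerA arr 0 + 1

-- ===== PORT B =====
-- the inner dedup pass of B: update every group's gcd with x, drop dead/duplicate values
def updB (x : Int) (groups : List (Int × Int)) (seen : PySem.Set Int) : List (Int × Int) :=
  match groups with
  | [] => []
  | (v, i) :: gs =>
    let w := pygcd v x
    if w ≠ 1 ∧ ¬ PySem.Set.contains seen w then (w, i) :: updB x gs (PySem.Set.add seen w)
    else updB x gs seen

-- B's single 'for j, x in enumerate(arr)' loop
def loopB (rest : List Int) (j : Int) (groups : List (Int × Int)) (m : Int) : Int :=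
  match rest with
  | [] => m
  | x :: xs =>
    let gs := updB x groups PySem.Set.empty
    let m' := match gs with
      | [] => m
      | (_, i) :: _ => max m (j - i)
    loopB xs (j + 1) (gs ++ [(x, j)]) m'

def find_longest_subarray_alt (arr : List Int) : Int := loopB arr 0 [] 0 + 1

-- ===== PRECONDITION & SPEC =====
def Spec_find_longest_subarray (arr : List Int) (out : Int) : Prop := out = find_longest_subarray_alt arr
instance (arr : List Int) (out : Int) : Decidable (Spec_find_longest_subarray arr out) := by unfold Spec_find_longest_subarray; infer_instance

-- ===== CLAIM (what is proved, stated in full; the proofs are below) =====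
def Claim_equal_find_longest_subarray : Prop := ∀ (arr : List Int), Dom_find_longest_subarray arr → Spec_find_longest_subarray arr (find_longest_subarray arr)

-- ===== LEMMAS AND PROOFS =====

-- length of A's alive run starting with accumulated gcd d over the remaining list
def runR (d : Int) (rest : List Int) : Int :=
  match rest with
  | [] => 0
  | x :: xs => if pygcd d x = 1 then 0 else 1 + runR (pygcd d x) xs

-- best run over all tails
def bestT (t : List Int) : Int :=
  match t with
  | [] => 0
  | a :: rest => max (runR a rest) (bestT rest)

theorem runR_nonneg (d : Int) (rest : List Int) : 0 ≤ runR d rest := by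
  induction rest generalizing d with
  | nil => simp [runR]
  | cons x xs ih =>
    simp only [runR]
    split
    · omega
    · have := ih (pygcd d x); omega

theorem bestT_nonneg (t : List Int) : 0 ≤ bestT t := by
  induction t with
  | nil => simp [bestT]
  | cons a rest ih => simp only [bestT]; have := runR_nonneg a rest; omega

theorem innerA_eq (rest : List Int) : ∀ d l m : Int, l ≤ m →
    innerA d rest l m = max m (l + runR d rest) := by
  induction rest with
  | nil => intro d l m h; simp [innerA, runR]; omega
  | cons x xs ih =>
    intro d l m h
    simp only [innerA, runR]
    by_cases h1 : pygcd d x = 1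
    · simp [h1]; omega
    · simp only [h1, if_false]
      rw [ih (pygcd d x) (l + 1) (max m (l + 1)) (by omega)]
      have := runR_nonneg (pygcd d x) xs
      omega

theorem outerA_eq (t : List Int) : ∀ m : Int, 0 ≤ m → outerA t m = max m (bestT t) := by
  induction t with
  | nil => intro m h; simp [outerA, bestT]; omega
  | cons a rest ih =>
    intro m h
    simp only [outerA, bestT]
    rw [innerA_eq rest a 0 m h, ih _ (by omega)]
    have := runR_nonneg a rest
    omega

-- contribution a group (value, start) can still add: its best future j-i, 0 if none
def cVal (j : Int) (xs : List Int) (p : Int × Int) : Int :=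
  if runR p.1 xs = 0 then 0 else j - 1 - p.2 + runR p.1 xs

def maxf (f : Int × Int → Int) (l : List (Int × Int)) : Int :=
  match l with
  | [] => 0
  | p :: ps => max (f p) (maxf f ps)

theorem maxf_nonneg (f : Int × Int → Int) (l : List (Int × Int)) : 0 ≤ maxf f l := by
  induction l with
  | nil => simp [maxf]
  | cons p ps ih => simp only [maxf]; omega

theorem le_maxf (f : Int × Int → Int) {l : List (Int × Int)} {p : Int × Int} (h : p ∈ l) :
    f p ≤ maxf f l := by
  induction l with
  | nil => simp at h
  | cons q qs ih =>
    simp only [maxf]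
    rcases List.mem_cons.mp h with rfl | h'
    · omega
    · have := ih h'; omega

theorem maxf_le (f : Int × Int → Int) {l : List (Int × Int)} {K : Int} (h0 : 0 ≤ K)
    (h : ∀ p ∈ l, f p ≤ K) : maxf f l ≤ K := by
  induction l with
  | nil => simpa [maxf]
  | cons q qs ih =>
    simp only [maxf]
    have h1 := h q (by simp)
    have h2 := ih (fun p hp => h p (by simp [hp]))
    omega

theorem maxf_append (f : Int × Int → Int) (l1 l2 : List (Int × Int)) :
    maxf f (l1 ++ l2) = max (maxf f l1) (maxf f l2) := by
  induction l1 with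
  | nil => simp [maxf]; have := maxf_nonneg f l2; omega
  | cons p ps ih => simp only [List.cons_append, maxf, ih]; omega

-- every kept group comes from an old group, gcd-updated, with a non-1 value
theorem updB_mem (x : Int) (groups : List (Int × Int)) (seen : PySem.Set Int) :
    ∀ w i : Int, (w, i) ∈ updB x groups seen →
      w ≠ 1 ∧ ∃ v, (v, i) ∈ groups ∧ w = pygcd v x := by
  induction groups generalizing seen with
  | nil => simp [updB]
  | cons q gs ih =>
    obtain ⟨v0, i0⟩ := q
    intro w i hp
    simp only [updB] at hp
    split at hp
    · rename_i hcond
      rcases List.mem_cons.mp hp with he | h'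
      · obtain ⟨rfl, rfl⟩ := Prod.mk.inj he
        exact ⟨hcond.1, v0, by simp, rfl⟩
      · obtain ⟨h1, v, hv, hev⟩ := ih _ w i h'
        exact ⟨h1, v, by simp [hv], hev⟩
    · obtain ⟨h1, v, hv, hev⟩ := ih _ w i hp
      exact ⟨h1, v, by simp [hv], hev⟩

-- updB is a sublist of the gcd-updated groups (so it keeps the index order)
theorem updB_sublist (x : Int) (groups : List (Int × Int)) (seen : PySem.Set Int) :
    (updB x groups seen).Sublist (groups.map (fun p => (pygcd p.1 x, p.2))) := by
  induction groups generalizing seen with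
  | nil => simp [updB]
  | cons q gs ih =>
    obtain ⟨v, i⟩ := q
    simp only [updB, List.map_cons]
    split
    · exact List.Sublist.cons₂ _ (ih _)
    · exact List.Sublist.cons _ (ih _)

theorem updB_pairwise (x : Int) (groups : List (Int × Int)) (seen : PySem.Set Int)
    (h : groups.Pairwise (fun p q => p.2 < q.2)) :
    (updB x groups seen).Pairwise (fun p q => p.2 < q.2) := by
  have hs := updB_sublist x groups seen
  have hm : (groups.map (fun p => (pygcd p.1 x, p.2))).Pairwise (fun p q => p.2 < q.2) := by
    rw [List.pairwise_map]; exact h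
  exact List.Pairwise.sublist hs hm

-- completeness: an alive old group's value is represented with a start no later than its own
theorem updB_complete (x : Int) (groups : List (Int × Int)) :
    ∀ seen : PySem.Set Int, groups.Pairwise (fun p q => p.2 < q.2) →
    ∀ v i, (v, i) ∈ groups → pygcd v x ≠ 1 → pygcd v x ∉ seen →
    ∃ i', i' ≤ i ∧ (pygcd v x, i') ∈ updB x groups seen := by
  induction groups with
  | nil => intro seen _ v i h; simp at h
  | cons q gs ih =>
    obtain ⟨v0, i0⟩ := q
    intro seen hpw v i hmem hne hseen
    simp only [updB]
    by_cases hc : pygcd v0 x ≠ 1 ∧ ¬ PySem.Set.contains seen (pygcd v0 x)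
    · rw [if_pos hc]
      rcases List.mem_cons.mp hmem with he | htail
      · obtain ⟨rfl, rfl⟩ := Prod.mk.inj he
        exact ⟨i, le_rfl, by simp⟩
      · by_cases hw : pygcd v x = pygcd v0 x
        · have hi : i0 < i := (List.pairwise_cons.mp hpw).1 (v, i) htail
          exact ⟨i0, by omega, by simp [hw]⟩
        · have hseen' : pygcd v x ∉ PySem.Set.add seen (pygcd v0 x) := by
            rw [PySem.Set.mem_add]
            rintro (h | h)
            · exact hseen h
            · exact hw h
          obtain ⟨i', hle, hmem'⟩ :=
            ih (PySem.Set.add seen (pygcd v0 x)) (List.pairwise_cons.mp hpw).2 v i htail hne hseen'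
          exact ⟨i', hle, by simp [hmem']⟩
    · rw [if_neg hc]
      rcases List.mem_cons.mp hmem with he | htail
      · exfalso
        obtain ⟨rfl, rfl⟩ := Prod.mk.inj he
        apply hc
        refine ⟨hne, ?_⟩
        simp only [PySem.Set.contains]
        intro hcont
        exact hseen (by simpa using hcont)
      · exact ih seen (List.pairwise_cons.mp hpw).2 v i htail hne hseen

-- the head of a strictly index-sorted list has the least index
theorem pairwise_head_le {l : List (Int × Int)} (h : l.Pairwise (fun p q => p.2 < q.2))
    {q0 : Int × Int} {rest : List (Int × Int)} (he : l = q0 :: rest) :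
    ∀ p ∈ l, q0.2 ≤ p.2 := by
  subst he
  intro p hp
  rcases List.mem_cons.mp hp with rfl | hp'
  · omega
  · have := (List.pairwise_cons.mp h).1 p hp'
    omega

-- cVal identity over one consumed element
theorem cVal_cons (j x : Int) (xs : List Int) (v i : Int) :
    cVal j (x :: xs) (v, i) =
      if pygcd v x = 1 then 0 else (j - i) + runR (pygcd v x) xs := by
  simp only [cVal, runR]
  by_cases h1 : pygcd v x = 1
  · simp [h1]
  · have := runR_nonneg (pygcd v x) xs
    rw [if_neg h1]
    rw [if_neg (by omega), if_neg h1]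
    omega

-- value of cVal when nothing was consumed yet
theorem cVal_pos (j : Int) (xs : List Int) (w i : Int) (hz : runR w xs ≠ 0) :
    cVal j xs (w, i) = j - 1 - i + runR w xs := by
  simp only [cVal]; rw [if_neg hz]

-- the key step: one iteration of B's loop accounts exactly for the old groups' contributions
theorem stepE (x j : Int) (xs : List Int) (groups : List (Int × Int)) (m : Int)
    (h0 : 0 ≤ m) (hpw : groups.Pairwise (fun p q => p.2 < q.2)) :
    max (match updB x groups PySem.Set.empty with
         | [] => m
         | (_, i) :: _ => max m (j - i))
      (maxf (cVal (j + 1) xs) (updB x groups PySem.Set.empty))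
    = max m (maxf (cVal j (x :: xs)) groups) := by
  have hRHSnn : 0 ≤ max m (maxf (cVal j (x :: xs)) groups) := by omega
  apply le_antisymm
  · have hmatch : (match updB x groups PySem.Set.empty with
         | [] => m
         | (_, i) :: _ => max m (j - i)) ≤ max m (maxf (cVal j (x :: xs)) groups) := by
      rcases hu : updB x groups PySem.Set.empty with _ | ⟨⟨w0, i0⟩, rest⟩
      · exact le_max_left m _
      · show max m (j - i0) ≤ max m (maxf (cVal j (x :: xs)) groups)
        obtain ⟨hne, v0, hv0mem, hv0⟩ :=
          updB_mem x groups PySem.Set.empty w0 i0 (by rw [hu]; exact List.mem_cons_self ..)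
        subst hv0
        have hle := le_maxf (cVal j (x :: xs)) hv0mem
        rw [cVal_cons, if_neg hne] at hle
        have := runR_nonneg (pygcd v0 x) xs
        omega
    have hfold : maxf (cVal (j + 1) xs) (updB x groups PySem.Set.empty)
        ≤ max m (maxf (cVal j (x :: xs)) groups) := by
      apply maxf_le _ hRHSnn
      rintro ⟨w, i⟩ hp
      obtain ⟨hne, v, hvmem, hv⟩ := updB_mem x groups PySem.Set.empty w i hp
      by_cases hz : runR w xs = 0
      · have hc0 : cVal (j + 1) xs (w, i) = 0 := by simp [cVal, hz]
        rw [hc0]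
        omega
      · subst hv
        have hcv1 := cVal_pos (j + 1) xs (pygcd v x) i hz
        have hle := le_maxf (cVal j (x :: xs)) hvmem
        rw [cVal_cons, if_neg hne] at hle
        omega
    omega
  · have hLHSm : m ≤ (match updB x groups PySem.Set.empty with
         | [] => m
         | (_, i) :: _ => max m (j - i)) := by
      rcases updB x groups PySem.Set.empty with _ | ⟨⟨w0, i0⟩, rest⟩ <;> simp
    have hnn2 := maxf_nonneg (cVal (j + 1) xs) (updB x groups PySem.Set.empty)
    have hfold : maxf (cVal j (x :: xs)) groups
        ≤ max (match updB x groups PySem.Set.empty with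
             | [] => m
             | (_, i) :: _ => max m (j - i))
          (maxf (cVal (j + 1) xs) (updB x groups PySem.Set.empty)) := by
      apply maxf_le _ (by have := hLHSm; omega)
      rintro ⟨v, i⟩ hvmem
      rw [cVal_cons]
      by_cases h1 : pygcd v x = 1
      · rw [if_pos h1]; omega
      · rw [if_neg h1]
        obtain ⟨i', hle, hmem'⟩ :=
          updB_complete x groups PySem.Set.empty hpw v i hvmem h1 (by simp [PySem.Set.empty])
        rcases hu : updB x groups PySem.Set.empty with _ | ⟨⟨w0, i0⟩, rest⟩
        · rw [hu] at hmem'; simp at hmem'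
        · have hpwu := updB_pairwise x groups PySem.Set.empty hpw
          have hi0 : i0 ≤ i' := by
            have := pairwise_head_le (hu ▸ hpwu) rfl (pygcd v x, i') (hu ▸ hmem')
            simpa using this
          rw [hu] at hmem'
          rw [hu] at hLHSm
          show j - i + runR (pygcd v x) xs ≤
            max (max m (j - i0)) (maxf (cVal (j + 1) xs) ((w0, i0) :: rest))
          by_cases hz : runR (pygcd v x) xs = 0
          · rw [hz]; omega
          · have hcv1 := cVal_pos (j + 1) xs (pygcd v x) i' hz
            have hle2 := le_maxf (cVal (j + 1) xs) hmem'
            have hnn := runR_nonneg (pygcd v x) xs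
            omega
    omega

-- maxf of the zero function
theorem maxf_cVal_nil (j : Int) (l : List (Int × Int)) : maxf (cVal j []) l = 0 := by
  apply le_antisymm
  · apply maxf_le _ le_rfl
    intro p _
    simp [cVal, runR]
  · exact maxf_nonneg _ _

-- invariant of B's main loop
theorem loopB_eq (xs : List Int) : ∀ (j : Int) (groups : List (Int × Int)) (m : Int),
    0 ≤ m → groups.Pairwise (fun p q => p.2 < q.2) → (∀ p ∈ groups, p.2 < j) →
    loopB xs j groups m = max (max m (maxf (cVal j xs) groups)) (bestT xs) := by
  induction xs with
  | nil =>
    intro j groups m h0 _ _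
    simp only [loopB, bestT, maxf_cVal_nil]
    omega
  | cons x xs ih =>
    intro j groups m h0 hpw hlt
    simp only [loopB]
    have hpw' : (updB x groups PySem.Set.empty ++ [(x, j)]).Pairwise (fun p q => p.2 < q.2) := by
      rw [List.pairwise_append]
      refine ⟨updB_pairwise x groups PySem.Set.empty hpw, by simp, ?_⟩
      rintro ⟨w, i⟩ hp q hq
      obtain ⟨_, v, hvmem, _⟩ := updB_mem x groups PySem.Set.empty w i hp
      have hi : i < j := hlt (v, i) hvmem
      simp only [List.mem_singleton] at hq
      subst hq
      exact hi
    have hlt' : ∀ p ∈ updB x groups PySem.Set.empty ++ [(x, j)], p.2 < j + 1 := by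
      rintro ⟨w, i⟩ hp
      rcases List.mem_append.mp hp with hp | hp
      · obtain ⟨_, v, hvmem, _⟩ := updB_mem x groups PySem.Set.empty w i hp
        have hi : i < j := hlt (v, i) hvmem
        show i < j + 1
        omega
      · simp only [List.mem_singleton, Prod.mk.injEq] at hp
        show i < j + 1
        omega
    have h0' : 0 ≤ (match updB x groups PySem.Set.empty with
         | [] => m
         | (_, i) :: _ => max m (j - i)) := by
      rcases updB x groups PySem.Set.empty with _ | ⟨⟨w0, i0⟩, rest⟩ <;> simp <;> omega
    rw [ih (j + 1) (updB x groups PySem.Set.empty ++ [(x, j)]) _ h0' hpw' hlt']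
    rw [maxf_append]
    have hx : max (cVal (j + 1) xs (x, j)) 0 = runR x xs := by
      simp only [cVal]
      have := runR_nonneg x xs
      by_cases hz : runR x xs = 0
      · simp [hz]
      · rw [if_neg hz]; omega
    have hE := stepE x j xs groups m h0 hpw
    simp only [maxf] at hx ⊢
    simp only [bestT]
    omega

-- ===== VERDICT (by name: the statement is the Claim_ definition above) =====
theorem find_longest_subarray_spec : Claim_equal_find_longest_subarray := by
  intro arr _
  unfold Spec_find_longest_subarray find_longest_subarray find_longest_subarray_alt
  rw [outerA_eq arr 0 le_rfl]
  rw [loopB_eq arr 0 [] 0 le_rfl (by simp) (by simp)]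
  simp only [maxf]
  have := bestT_nonneg arr
  omega
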